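-- pv_equiv track=rewrite | github.com/B-ki/advent_of_code | 2024/08/P2.py | create_new_map
-- ===== SOURCE A (Python) =====
-- def create_new_map(list_lines: list[str], set_antinodes: set) -> list[str]:
--     """
--     Create new map
--     """
--     new_map = []
--     max_x = len(list_lines[0])
--     max_y = len(list_lines)
--     for y in range(max_y):
--         new_line = ""
--         for x in range(max_x):
--             if (x, y) in set_antinodes:
--                 new_line += "#"
--             else:
--                 new_line += list_lines[y][x]
--         new_map.append(new_line)
--     return new_map
-- ===== SOURCE B (Python) =====
-- def create_new_map(list_lines: list[str], set_antinodes: set) -> list[str]: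
--     """Create new map by painting '#' over a copy of the grid."""
--     max_x = len(list_lines[0])
--     max_y = len(list_lines)
--     grid = [list(line[:max_x]) for line in list_lines]
--     for (x, y) in set_antinodes:
--         if 0 <= x < max_x and 0 <= y < max_y:
--             grid[y][x] = "#"
--     return ["".join(row) for row in grid]
-- ===== Notes on version B (the rewrite author's own statement) =====
-- stated objective: alternative
-- what changed: Instead of scanning every cell and testing set membership, B copies the grid once and paints '#' only at the in-bounds antinode coordinates, iterating over the sparse antinode set.
-- outside the precondition, e.g. on create_new_map(['ab', 'a'], {(1, 1)}): A returns ['ab', 'a#'], B raises IndexError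
import Mathlib
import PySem

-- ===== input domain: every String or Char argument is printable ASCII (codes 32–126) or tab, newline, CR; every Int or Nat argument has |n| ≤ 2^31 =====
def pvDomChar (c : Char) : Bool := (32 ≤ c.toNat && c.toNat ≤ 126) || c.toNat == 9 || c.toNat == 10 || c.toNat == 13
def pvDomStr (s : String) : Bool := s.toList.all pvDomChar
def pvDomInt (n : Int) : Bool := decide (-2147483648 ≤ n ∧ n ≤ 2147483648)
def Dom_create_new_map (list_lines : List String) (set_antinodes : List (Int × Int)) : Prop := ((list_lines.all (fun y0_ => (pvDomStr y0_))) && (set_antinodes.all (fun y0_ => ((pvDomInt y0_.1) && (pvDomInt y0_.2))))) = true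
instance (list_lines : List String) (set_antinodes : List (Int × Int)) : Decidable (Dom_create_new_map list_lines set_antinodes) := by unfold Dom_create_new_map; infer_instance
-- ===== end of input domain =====

-- B paints '#' over a copy of the grid at the in-bounds antinode coordinates instead of
-- testing set membership at every cell (alternative decomposition, same result).

-- ===== PORT A =====
def create_new_map (list_lines : List String) (set_antinodes : List (Int × Int)) : List String :=
  let max_x := (list_lines.getD 0 "").toList.length
  let max_y := list_lines.length
  (List.range max_y).foldl (fun new_map (y : Nat) =>
    let new_line := (List.range max_x).foldl (fun nl (x : Nat) =>
      nl ++ [if ((x : Int), (y : Int)) ∈ set_antinodes then '#'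
             else ((list_lines.getD y "").toList.getD x ' ')]) []
    new_map ++ [String.ofList new_line]) []

-- ===== PORT B =====
def create_new_map_alt (list_lines : List String) (set_antinodes : List (Int × Int)) : List String :=
  let max_x := (list_lines.getD 0 "").toList.length
  let max_y := list_lines.length
  let grid := list_lines.map (fun line => line.toList.take max_x)
  let painted := set_antinodes.foldl (fun g p =>
    if 0 ≤ p.1 ∧ p.1 < (max_x : Int) ∧ 0 ≤ p.2 ∧ p.2 < (max_y : Int) then
      g.set p.2.toNat ((g.getD p.2.toNat []).set p.1.toNat '#')
    else g) grid
  painted.map String.ofList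

-- ===== PRECONDITION & SPEC =====
-- Pre_ excludes the empty grid and ragged grids with a row shorter than the first row:
-- on those A raises IndexError, except when every missing cell happens to be an antinode
-- (then A still returns but B raises IndexError while painting the missing cell).
def Pre_create_new_map (list_lines : List String) (set_antinodes : List (Int × Int)) : Prop :=
  list_lines ≠ [] ∧ ∀ s ∈ list_lines, (list_lines.getD 0 "").toList.length ≤ s.toList.length
instance (list_lines : List String) (set_antinodes : List (Int × Int)) : Decidable (Pre_create_new_map list_lines set_antinodes) := by unfold Pre_create_new_map; infer_instance
def pvWitness_create_new_map : List String × (List (Int × Int)) := (["ab", "cd"], [(0, 1)])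

def Spec_create_new_map (list_lines : List String) (set_antinodes : List (Int × Int)) (out : List String) : Prop := out = create_new_map_alt list_lines set_antinodes
instance (list_lines : List String) (set_antinodes : List (Int × Int)) (out : List String) : Decidable (Spec_create_new_map list_lines set_antinodes out) := by unfold Spec_create_new_map; infer_instance

-- ===== CLAIM (what is proved, stated in full; the proofs are below) =====
def Claim_equal_create_new_map : Prop := ∀ (list_lines : List String) (set_antinodes : List (Int × Int)), Dom_create_new_map list_lines set_antinodes → Pre_create_new_map list_lines set_antinodes → Spec_create_new_map list_lines set_antinodes (create_new_map list_lines set_antinodes)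

-- ===== LEMMAS AND PROOFS =====

-- the painting step of B
def pvPaint (mx my : Nat) (g : List (List Char)) (p : Int × Int) : List (List Char) :=
  if 0 ≤ p.1 ∧ p.1 < (mx : Int) ∧ 0 ≤ p.2 ∧ p.2 < (my : Int) then
    g.set p.2.toNat ((g.getD p.2.toNat []).set p.1.toNat '#')
  else g

lemma pvPaint_length (mx my : Nat) (g : List (List Char)) (p : Int × Int) :
    (pvPaint mx my g p).length = g.length := by
  unfold pvPaint; split <;> simp

lemma pvPaint_rows (mx my : Nat) (g : List (List Char)) (p : Int × Int)
    (hg : g.length = my) (h : ∀ r ∈ g, r.length = mx) :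
    ∀ r ∈ pvPaint mx my g p, r.length = mx := by
  intro r hr
  unfold pvPaint at hr
  split at hr
  · rename_i hc
    rcases List.mem_or_eq_of_mem_set hr with h1 | h1
    · exact h r h1
    · subst h1
      simp only [List.length_set]
      have hy : p.2.toNat < g.length := by omega
      rw [List.getD_eq_getElem g [] hy]
      exact h _ (List.getElem_mem hy)
  · exact h r hr

lemma pvFold_length (mx my : Nat) (S : List (Int × Int)) (g : List (List Char)) :
    (S.foldl (pvPaint mx my) g).length = g.length := by
  induction S generalizing g with
  | nil => rfl
  | cons p S ih => simp [List.foldl_cons, ih, pvPaint_length]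

lemma pvFold_rows (mx my : Nat) (S : List (Int × Int)) (g : List (List Char))
    (hg : g.length = my) (h : ∀ r ∈ g, r.length = mx) :
    ∀ r ∈ S.foldl (pvPaint mx my) g, r.length = mx := by
  induction S generalizing g with
  | nil => exact h
  | cons p S ih =>
    exact ih _ ((pvPaint_length mx my g p).trans hg) (pvPaint_rows mx my g p hg h)

lemma pvPaint_getD (mx my : Nat) (g : List (List Char)) (p : Int × Int)
    (hg : g.length = my) (hrows : ∀ r ∈ g, r.length = mx)
    (y x : Nat) (hy : y < my) (hx : x < mx) :
    ((pvPaint mx my g p).getD y []).getD x ' ' =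
      if p = ((x : Int), (y : Int)) then '#' else (g.getD y []).getD x ' ' := by
  have hyg : y < g.length := by omega
  unfold pvPaint
  by_cases hc : 0 ≤ p.1 ∧ p.1 < (mx : Int) ∧ 0 ≤ p.2 ∧ p.2 < (my : Int)
  · simp only [if_pos hc]
    obtain ⟨h1, h2, h3, h4⟩ := hc
    have hy2 : p.2.toNat < g.length := by omega
    have hryy : (g[y]'hyg).length = mx := hrows _ (List.getElem_mem hyg)
    have hry : (g[y]?.getD []).length = mx := by
      rw [List.getElem?_eq_getElem hyg]; exact hryy
    simp only [List.getD_eq_getElem?_getD, List.getElem?_set]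
    by_cases hyy : p.2.toNat = y
    · by_cases hxx : p.1.toNat = x
      · have hp : p = ((x : Int), (y : Int)) := by
          obtain ⟨a, b⟩ := p; simp only [Prod.mk.injEq]; constructor <;> omega
        simp [hp, hx, hyg, hryy]
      · have hp : ¬ p = ((x : Int), (y : Int)) := by
          intro h; apply hxx; rw [h]; simp
        simp [hyy, hxx, hp, hyg]
    · have hp : ¬ p = ((x : Int), (y : Int)) := by
        intro h; apply hyy; rw [h]; simp
      simp [hyy, hp]
  · simp only [if_neg hc]
    have hne : ¬ p = ((x : Int), (y : Int)) := by
      intro hp; apply hc; subst hp; refine ⟨by omega, by omega, by omega, by omega⟩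
    simp [hne]

lemma pvFold_getD (mx my : Nat) (S : List (Int × Int)) (g : List (List Char))
    (hlen : g.length = my) (hrows : ∀ r ∈ g, r.length = mx)
    (y x : Nat) (hy : y < my) (hx : x < mx) :
    ((S.foldl (pvPaint mx my) g).getD y []).getD x ' ' =
      if ((x : Int), (y : Int)) ∈ S then '#' else (g.getD y []).getD x ' ' := by
  induction S generalizing g with
  | nil => simp
  | cons p S ih =>
    rw [List.foldl_cons,
      ih (pvPaint mx my g p) ((pvPaint_length mx my g p).trans hlen)
        (pvPaint_rows mx my g p hlen hrows),
      pvPaint_getD mx my g p hlen hrows y x hy hx]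
    by_cases hmem : ((x : Int), (y : Int)) ∈ S
    · simp [hmem]
    · by_cases hp : p = ((x : Int), (y : Int))
      · simp [hp, hmem]
      · have hne : ¬ ((x : Int), (y : Int)) ∈ p :: S := by
          simp only [List.mem_cons, not_or]
          exact ⟨fun h => hp (Eq.symm h), hmem⟩
        simp [hne, hmem, hp]

-- ===== VERDICT (by name: the statement is the Claim_ definition above) =====
theorem create_new_map_spec : Claim_equal_create_new_map := by
  intro list_lines set_antinodes _hdom hpre
  obtain ⟨hne, hmin⟩ := hpre
  unfold Spec_create_new_map create_new_map create_new_map_alt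
  simp only [PySem.List.foldl_append_singleton_eq_map, List.nil_append]
  set mx := (list_lines.getD 0 "").toList.length with hmx
  set my := list_lines.length with hmy
  set grid := list_lines.map (fun line => line.toList.take mx) with hgrid
  have hfold : (fun (g : List (List Char)) (p : Int × Int) =>
      if 0 ≤ p.1 ∧ p.1 < (mx : Int) ∧ 0 ≤ p.2 ∧ p.2 < (my : Int) then
        g.set p.2.toNat ((g.getD p.2.toNat []).set p.1.toNat '#')
      else g) = pvPaint mx my := rfl
  rw [hfold]
  have hglen : grid.length = my := by simp [hgrid, hmy]
  have hgrows : ∀ r ∈ grid, r.length = mx := by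
    intro r hr
    rw [hgrid] at hr
    obtain ⟨line, hline, rfl⟩ := List.mem_map.mp hr
    simpa using Nat.min_eq_left (hmin line hline)
  have hplen : (set_antinodes.foldl (pvPaint mx my) grid).length = my :=
    (pvFold_length mx my set_antinodes grid).trans hglen
  have hprows : ∀ r ∈ set_antinodes.foldl (pvPaint mx my) grid, r.length = mx :=
    pvFold_rows mx my set_antinodes grid hglen hgrows
  apply List.ext_getElem
  · simp [hplen]
  · intro y hy1 hy2
    simp only [List.getElem_map, List.getElem_range]
    have hym : y < my := by simpa using hy1
    have hrowlen : ((set_antinodes.foldl (pvPaint mx my) grid)[y]'(by omega)).length = mx :=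
      hprows _ (List.getElem_mem (by omega))
    congr 1
    apply List.ext_getElem
    · simp [hrowlen]
    · intro x hx1 hx2
      simp only [List.getElem_map, List.getElem_range]
      have hxm : x < mx := by simpa using hx1
      have lhs_eq : ((set_antinodes.foldl (pvPaint mx my) grid)[y]'(by omega))[x]'(by omega) =
          ((set_antinodes.foldl (pvPaint mx my) grid).getD y []).getD x ' ' := by
        rw [List.getD_eq_getElem _ [] (by omega), List.getD_eq_getElem _ ' ' (by rw [hrowlen]; omega)]
      rw [lhs_eq, pvFold_getD mx my set_antinodes grid hglen hgrows y x hym hxm]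
      have hgline : grid.getD y [] = (list_lines.getD y "").toList.take mx := by
        rw [List.getD_eq_getElem _ [] (by omega), List.getD_eq_getElem _ "" (by omega)]
        simp [hgrid]
      by_cases hmem : ((x : Int), (y : Int)) ∈ set_antinodes
      · simp [hmem]
      · simp only [if_neg hmem]
        rw [hgline]
        have hyl : y < list_lines.length := by omega
        have hmxle : mx ≤ (list_lines.getD y "").toList.length := by
          rw [List.getD_eq_getElem _ "" hyl]
          exact hmin _ (List.getElem_mem hyl)
        have htl : ((list_lines.getD y "").toList.take mx).length = mx := by
          rw [List.length_take]; omega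
        rw [List.getD_eq_getElem _ ' ' (by omega),
            List.getD_eq_getElem _ ' ' (by rw [htl]; exact hxm)]
        simp [List.getElem_take]
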